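-- pv_equiv track=rewrite | github.com/anhduy1202/Leetcode-Prep | Array/minimumPackage_Delivered.py | minPackage
-- ===== SOURCE A (Python) =====
-- from collections import Counter
--
-- def minPackage(arr):
--     freqMap = Counter(arr)
--     res = 0
--     for v in freqMap.values():
--         if v > 2:
--             res += v // 3
--             v = v % 3
--         if v > 1:
--             res += v // 2
--             v = v % 2
--         if v == 1:
--             return -1
--     return res
-- ===== SOURCE B (Python) =====
-- def minPackage(arr):
--     s = sorted(arr)
--     total = 0
--     i = 0
--     n = len(s)
--     while i < n:
--         j = i
--         while j < n and s[j] == s[i]: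
--             j += 1
--         v = j - i
--         if v % 3 == 1:
--             return -1
--         total += v // 3 + (v % 3) // 2
--         i = j
--     return total
-- ===== Notes on version B (the rewrite author's own statement) =====
-- stated objective: alternative
-- what changed: Replaces the Counter hash map and the greedy take-3s-then-2s branch cascade by sorting the array and scanning consecutive equal runs, adding the closed form v//3 + (v%3)//2 per run and returning -1 when a run length is 1 mod 3.
import Mathlib
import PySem

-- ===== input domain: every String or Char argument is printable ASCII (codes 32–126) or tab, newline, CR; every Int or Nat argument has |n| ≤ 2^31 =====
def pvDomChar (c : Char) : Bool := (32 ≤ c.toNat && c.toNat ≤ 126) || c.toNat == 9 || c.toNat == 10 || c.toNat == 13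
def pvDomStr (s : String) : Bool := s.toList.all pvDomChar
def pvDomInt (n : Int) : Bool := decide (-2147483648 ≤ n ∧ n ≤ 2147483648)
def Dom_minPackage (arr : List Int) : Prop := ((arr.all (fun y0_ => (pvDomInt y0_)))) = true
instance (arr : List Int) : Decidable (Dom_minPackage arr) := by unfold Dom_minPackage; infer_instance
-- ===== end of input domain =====

-- B re-implements A by sorting and scanning consecutive equal runs with a per-run closed form
-- (v//3 + (v%3)//2, -1 on v%3==1) instead of A's Counter plus greedy-3s-then-2s branch cascade;
-- objective: alternative (different algorithm, similar cost).

-- ===== PORT A =====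
-- the for-loop over the counter's values, with its early 'return -1'
def minLoopA : List Int → Int → Int
  | [], res => res
  | v :: vs, res =>
    let p1 := if v > 2 then (res + PySem.Int.floordiv v 3, PySem.Int.mod v 3) else (res, v)
    let p2 := if p1.2 > 1 then (p1.1 + PySem.Int.floordiv p1.2 2, PySem.Int.mod p1.2 2) else p1
    if p2.2 == 1 then -1 else minLoopA vs p2.1

def minPackage (arr : List Int) : Int :=
  minLoopA (PySem.Dict.counter arr).values 0

-- ===== PORT B =====
-- the outer while loop of Source B: the inner while locates the end of the run of the current
-- element (= takeWhile/dropWhile on the tail), v is the run length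
def minLoopB : List Int → Int → Int
  | [], total => total
  | x :: xs, total =>
    let v : Int := 1 + (xs.takeWhile (fun y => y == x)).length
    if PySem.Int.mod v 3 == 1 then -1
    else minLoopB (xs.dropWhile (fun y => y == x))
      (total + PySem.Int.floordiv v 3 + PySem.Int.floordiv (PySem.Int.mod v 3) 2)
termination_by l _ => l.length
decreasing_by simpa using Nat.lt_succ_of_le (List.length_dropWhile_le _ _)

def minPackage_alt (arr : List Int) : Int :=
  minLoopB (PySem.List.sorted arr (fun x => x) false) 0

-- ===== PRECONDITION & SPEC =====
def Spec_minPackage (arr : List Int) (out : Int) : Prop := out = minPackage_alt arr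
instance (arr : List Int) (out : Int) : Decidable (Spec_minPackage arr out) := by unfold Spec_minPackage; infer_instance

-- ===== CLAIM (what is proved, stated in full; the proofs are below) =====
def Claim_equal_minPackage : Prop := ∀ (arr : List Int), Dom_minPackage arr → Spec_minPackage arr (minPackage arr)

-- ===== LEMMAS AND PROOFS =====

-- per-value contribution and the "frequency ≡ 1 (mod 3)" failure test
def pvG (v : Int) : Int := Int.fdiv v 3 + Int.fdiv (Int.fmod v 3) 2
def pvBad (v : Int) : Bool := Int.fmod v 3 == 1

-- canonical form of both loops over a list of (positive) frequencies
def pvF (l : List Int) (res : Int) : Int :=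
  if l.any pvBad then -1 else res + (l.map pvG).sum

-- run lengths of a list, as minLoopB walks it
def pvRuns : List Int → List Int
  | [] => []
  | x :: xs =>
    (1 + (xs.takeWhile (fun y => y == x)).length : Int) :: pvRuns (xs.dropWhile (fun y => y == x))
termination_by l => l.length
decreasing_by simpa using Nat.lt_succ_of_le (List.length_dropWhile_le _ _)

theorem pvF_perm (l l' : List Int) (h : l.Perm l') (res : Int) : pvF l res = pvF l' res := by
  unfold pvF
  have hany : l.any pvBad = l'.any pvBad := by
    rw [Bool.eq_iff_iff]
    simp only [List.any_eq_true]
    exact ⟨fun ⟨x, hx, hb⟩ => ⟨x, h.mem_iff.mp hx, hb⟩, fun ⟨x, hx, hb⟩ => ⟨x, h.mem_iff.mpr hx, hb⟩⟩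
  rw [hany, (h.map pvG).sum_eq]

theorem minLoopA_step (v : Int) (vs : List Int) (res : Int) (hv : 1 ≤ v) :
    minLoopA (v :: vs) res = if pvBad v then -1 else minLoopA vs (res + pvG v) := by
  have hmod : 3 * Int.fdiv v 3 + Int.fmod v 3 = v := Int.mul_fdiv_add_fmod v 3
  have h0 : 0 ≤ Int.fmod v 3 := Int.fmod_nonneg (by omega) (by norm_num)
  have h3 : Int.fmod v 3 < 3 := Int.fmod_lt_of_pos v (by norm_num)
  simp only [minLoopA, pvBad, pvG, PySem.Int.floordiv, PySem.Int.mod]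
  by_cases hv2 : v > 2
  · simp only [hv2, if_pos]
    interval_cases h : Int.fmod v 3
    · norm_num [Int.fdiv, Int.fmod]
    · norm_num
    · norm_num [Int.fdiv, Int.fmod]
      ring_nf
  · have : v = 1 ∨ v = 2 := by omega
    rcases this with rfl | rfl
    · norm_num [Int.fdiv, Int.fmod]
    · norm_num [Int.fdiv, Int.fmod]

theorem minLoopA_eq (l : List Int) (res : Int) (h : ∀ v ∈ l, 1 ≤ v) :
    minLoopA l res = pvF l res := by
  induction l generalizing res with
  | nil => simp [minLoopA, pvF]
  | cons v vs ih =>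
    rw [minLoopA_step v vs res (h v (by simp))]
    by_cases hb : pvBad v
    · simp [pvF, hb]
    · rw [if_neg hb, ih _ (fun w hw => h w (by simp [hw]))]
      unfold pvF
      simp only [List.any_cons, hb, Bool.false_or, List.map_cons, List.sum_cons]
      split_ifs <;> ring

theorem minLoopB_eq (s : List Int) (total : Int) :
    minLoopB s total = pvF (pvRuns s) total := by
  induction s using pvRuns.induct generalizing total with
  | case1 => simp [minLoopB, pvRuns, pvF]
  | case2 x xs ih =>
    rw [minLoopB, pvRuns]
    simp only [PySem.Int.mod, PySem.Int.floordiv]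
    by_cases hb : ((1 + ((xs.takeWhile (fun y => y == x)).length : Int)).fmod 3 == 1) = true
    · simp [pvF, pvBad, hb]
    · rw [if_neg hb, ih]
      unfold pvF
      simp only [pvBad, List.any_cons, hb, Bool.false_or, List.map_cons, List.sum_cons, pvG]
      split_ifs <;> ring

theorem not_mem_dropWhile_beq (x : Int) (xs : List Int) (h : (x :: xs).Pairwise (· ≤ ·)) :
    x ∉ xs.dropWhile (fun y => y == x) := by
  induction xs with
  | nil => simp
  | cons a t ih =>
    rcases List.pairwise_cons.mp h with ⟨hx, hat⟩
    by_cases ha : (a == x) = true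
    · rw [List.dropWhile_cons, if_pos ha]
      exact ih (List.pairwise_cons.mpr ⟨fun y hy => hx y (by simp [hy]), (List.pairwise_cons.mp hat).2⟩)
    · rw [List.dropWhile_cons, if_neg ha]
      intro hmem
      rcases List.mem_cons.mp hmem with rfl | hmem
      · simp at ha
      · have h1 : x ≤ a := hx a (by simp)
        have h2 : a ≤ x := (List.pairwise_cons.mp hat).1 x hmem
        have : a = x := le_antisymm h2 h1
        simp [this] at ha

-- dedup of a sorted list, up to permutation, after removing the leading run
theorem pvRuns_perm (n : ℕ) : ∀ (s : List Int), s.length ≤ n → s.Pairwise (· ≤ ·) →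
    (pvRuns s).Perm ((PySem.List.dedup s).map (fun k => ((s.count k : Int)))) := by
  induction n with
  | zero =>
    intro s hs _
    have : s = [] := List.length_eq_zero_iff.mp (Nat.le_zero.mp hs)
    subst this
    simp [pvRuns, PySem.List.dedup, PySem.Set.ofList]
  | succ n ih =>
    intro s hs hp
    match s with
    | [] => simp [pvRuns, PySem.List.dedup, PySem.Set.ofList]
    | x :: xs =>
      set run := xs.takeWhile (fun y => y == x) with hrun
      set rest := xs.dropWhile (fun y => y == x) with hrest
      have hsplit : run ++ rest = xs := List.takeWhile_append_dropWhile
      have hxnotin : x ∉ rest := not_mem_dropWhile_beq x xs hp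
      have hrunx : ∀ y ∈ run, y = x := fun y hy => by
        have := List.mem_takeWhile_imp hy; simpa using this
      have hrestlen : rest.length ≤ n := by
        have hle := List.length_dropWhile_le (fun y => y == x) xs
        rw [← hrest] at hle
        simp only [List.length_cons] at hs
        omega
      have hrestp : rest.Pairwise (· ≤ ·) :=
        List.Pairwise.sublist (hrest ▸ List.dropWhile_sublist _) (List.pairwise_cons.mp hp).2
      -- count of x in the whole list is 1 + run length
      have hcountx : ((x :: xs).count x : Int) = 1 + run.length := by
        have hcr : run.count x = run.length := by
          rw [List.count_eq_length]
          intro y hy; exact (hrunx y hy).symm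
        have hcrest : rest.count x = 0 := List.count_eq_zero.mpr hxnotin
        have : (x :: xs).count x = 1 + run.count x + rest.count x := by
          rw [List.count_cons_self, ← hsplit, List.count_append]; omega
        rw [this, hcr, hcrest]; push_cast; ring
      -- counts of elements of rest are unchanged by dropping the leading run
      have hcount_rest : ∀ k ∈ rest, ((x :: xs).count k : Int) = (rest.count k : Int) := by
        intro k hk
        have hkx : k ≠ x := fun h => hxnotin (h ▸ hk)
        have hcr : run.count k = 0 := List.count_eq_zero.mpr (fun hmem => hkx (hrunx k hmem))
        have : (x :: xs).count k = run.count k + rest.count k := by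
          rw [List.count_cons_of_ne (Ne.symm hkx), ← hsplit, List.count_append]
        rw [this, hcr]; norm_num
      -- dedup (x :: xs) is a permutation of x :: dedup rest
      have hxnotdedup : x ∉ PySem.List.dedup rest := fun h => hxnotin ((PySem.List.mem_dedup _ _).mp h)
      have hdperm : (PySem.List.dedup (x :: xs)).Perm (x :: PySem.List.dedup rest) := by
        rw [List.perm_ext_iff_of_nodup (PySem.List.nodup_dedup _)
          (List.nodup_cons.mpr ⟨hxnotdedup, PySem.List.nodup_dedup _⟩)]
        intro a
        rw [PySem.List.mem_dedup, List.mem_cons, List.mem_cons, PySem.List.mem_dedup]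
        constructor
        · rintro (rfl | ha)
          · exact Or.inl rfl
          · rw [← hsplit, List.mem_append] at ha
            rcases ha with ha | ha
            · exact Or.inl (hrunx a ha)
            · exact Or.inr ha
        · rintro (rfl | ha)
          · exact Or.inl rfl
          · exact Or.inr (by rw [← hsplit]; exact List.mem_append_right _ ha)
      have h1 : pvRuns (x :: xs) = ((1 + run.length : Int)) :: pvRuns rest := by
        rw [pvRuns, ← hrun, ← hrest]
      have h2 : (((1 + run.length : Int)) :: pvRuns rest).Perm
          (((1 + run.length : Int)) :: (PySem.List.dedup rest).map (fun k => ((rest.count k : Int)))) :=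
        (ih rest hrestlen hrestp).cons _
      have h3 : (((1 + run.length : Int)) :: (PySem.List.dedup rest).map (fun k => ((rest.count k : Int))))
          = ((x :: PySem.List.dedup rest).map (fun k => (((x :: xs).count k : Int)))) := by
        rw [List.map_cons, hcountx]
        congr 1
        exact (List.map_congr_left (fun k hk =>
          (hcount_rest k ((PySem.List.mem_dedup _ _).mp hk)).symm))
      rw [h1]
      exact (h3 ▸ h2).trans ((hdperm.map _).symm)

-- ===== VERDICT (by name: the statement is the Claim_ definition above) =====
theorem minPackage_spec : Claim_equal_minPackage := by
  intro arr _
  unfold Spec_minPackage minPackage minPackage_alt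
  -- A's side: the counter's values are the counts of the distinct elements
  have hvals : (PySem.Dict.counter arr).values
      = (PySem.List.dedup arr).map (fun k => ((arr.count k : Int))) := by
    rw [PySem.Dict.values, PySem.Dict.items_counter, List.map_map]
    rfl
  have hpos : ∀ v ∈ (PySem.Dict.counter arr).values, 1 ≤ v := by
    rw [hvals]
    intro v hv
    rcases List.mem_map.mp hv with ⟨k, hk, rfl⟩
    have : 0 < arr.count k := List.count_pos_iff.mpr ((PySem.List.mem_dedup _ _).mp hk)
    omega
  rw [minLoopA_eq _ 0 hpos, minLoopB_eq, hvals]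
  -- B's side: the run lengths of the sorted list are a permutation of those counts
  set s := PySem.List.sorted arr (fun x => x) false with hsdef
  have hsp : s.Pairwise (· ≤ ·) := PySem.List.sorted_pairwise arr (fun x => x)
  have hperm1 : (pvRuns s).Perm ((PySem.List.dedup s).map (fun k => ((s.count k : Int)))) :=
    pvRuns_perm s.length s le_rfl hsp
  have hcnt : ∀ k : Int, s.count k = arr.count k :=
    fun k => (PySem.List.sorted_perm arr (fun x => x) false).count_eq k
  have hmapeq : (PySem.List.dedup s).map (fun k => ((s.count k : Int)))
      = (PySem.List.dedup s).map (fun k => ((arr.count k : Int))) := by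
    exact List.map_congr_left (fun k _ => by rw [hcnt k])
  have hdd : (PySem.List.dedup s).Perm (PySem.List.dedup arr) := by
    rw [List.perm_ext_iff_of_nodup (PySem.List.nodup_dedup _) (PySem.List.nodup_dedup _)]
    intro a
    rw [PySem.List.mem_dedup, PySem.List.mem_dedup, PySem.List.mem_sorted]
  have hperm : (pvRuns s).Perm ((PySem.List.dedup arr).map (fun k => ((arr.count k : Int)))) :=
    (hmapeq ▸ hperm1).trans (hdd.map _)
  exact pvF_perm _ _ hperm.symm 0
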